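-- pv_equiv track=rewrite | github.com/scipp/matplotgl | src/matplotgl/utils.py | html_to_svg
-- ===== SOURCE A (Python) =====
-- def html_to_svg(text: str, baseline: str) -> str:
--     """Convert HTML text to SVG-compatible text using tspan for subscripts/superscripts.
--
--     Parameters
--     ----------
--     text:
--         The input HTML text.
--     baseline:
--         The dominant baseline alignment for the text ('hanging', 'middle', 'baseline').
--
--     Returns
--     -------
--     str
--         The SVG-compatible text.
--     """
--     replacements = {
--         "hanging": {
--             "<sup>": '<tspan dy="-7%" font-size="70%">',
--             "</sup>": "</tspan>",
--             "<sub>": '<tspan dy="7%" font-size="70%">',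
--             "</sub>": "</tspan>",
--         },
--         "middle": {
--             "<sup>": '<tspan dy="-2%" font-size="70%">',
--             "</sup>": "</tspan>",
--             "<sub>": '<tspan dy="2%" font-size="70%">',
--             "</sub>": "</tspan>",
--         },
--     }
--
--     for entity, replacement in replacements[baseline].items():
--         text = text.replace(entity, replacement)
--
--     return text
-- ===== SOURCE B (Python) =====
-- def html_to_svg(text: str, baseline: str) -> str:
--     """Single left-to-right scan replacing the four tags via a lookup table."""
--     replacements = {
--         "hanging": {
--             "<sup>": '<tspan dy="-7%" font-size="70%">',
--             "</sup>": "</tspan>",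
--             "<sub>": '<tspan dy="7%" font-size="70%">',
--             "</sub>": "</tspan>",
--         },
--         "middle": {
--             "<sup>": '<tspan dy="-2%" font-size="70%">',
--             "</sup>": "</tspan>",
--             "<sub>": '<tspan dy="2%" font-size="70%">',
--             "</sub>": "</tspan>",
--         },
--     }
--     table = replacements[baseline]
--     out = []
--     i = 0
--     while i < len(text):
--         for tag in ("<sup>", "</sup>", "<sub>", "</sub>"):
--             if text.startswith(tag, i):
--                 out.append(table[tag])
--                 i += len(tag)
--                 break
--         else:
--             out.append(text[i])
--             i += 1
--     return "".join(out)
-- ===== Notes on version B (the rewrite author's own statement) =====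
-- stated objective: alternative
-- what changed: B replaces the four sequential str.replace passes by one left-to-right scan that checks the four tags at each position and substitutes from a lookup table, building the output once.
import Mathlib
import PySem

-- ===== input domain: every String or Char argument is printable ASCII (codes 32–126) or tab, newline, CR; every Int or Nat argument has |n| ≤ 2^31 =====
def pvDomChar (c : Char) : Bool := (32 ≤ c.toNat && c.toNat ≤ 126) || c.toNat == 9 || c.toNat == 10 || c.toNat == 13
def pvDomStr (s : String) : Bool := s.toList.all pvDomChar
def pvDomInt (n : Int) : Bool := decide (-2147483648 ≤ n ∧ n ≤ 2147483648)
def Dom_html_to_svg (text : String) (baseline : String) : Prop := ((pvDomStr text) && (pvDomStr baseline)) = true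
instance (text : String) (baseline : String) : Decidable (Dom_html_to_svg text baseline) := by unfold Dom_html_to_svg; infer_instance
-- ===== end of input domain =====

-- B replaces four sequential str.replace passes by one left-to-right scan with a tag lookup table; same result, one pass.


-- ===== PORT A =====
-- the nested dict literal of A
def replsA : PySem.Dict String (PySem.Dict String String) :=
  PySem.Dict.ofList
    [ ("hanging", PySem.Dict.ofList
        [ ("<sup>", "<tspan dy=\"-7%\" font-size=\"70%\">"),
          ("</sup>", "</tspan>"),
          ("<sub>", "<tspan dy=\"7%\" font-size=\"70%\">"),
          ("</sub>", "</tspan>") ]),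
      ("middle", PySem.Dict.ofList
        [ ("<sup>", "<tspan dy=\"-2%\" font-size=\"70%\">"),
          ("</sup>", "</tspan>"),
          ("<sub>", "<tspan dy=\"2%\" font-size=\"70%\">"),
          ("</sub>", "</tspan>") ]) ]

-- A: for entity, replacement in replacements[baseline].items(): text = text.replace(entity, replacement)
-- replacements[baseline] raises KeyError for other baselines (excluded by Pre_); the port returns text there.
def html_to_svg (text : String) (baseline : String) : String :=
  match replsA.get? baseline with
  | none => text
  | some tbl => tbl.items.foldl (fun t p => PySem.Str.replace t p.1 p.2) text

-- ===== PORT B =====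
-- same dict literal in B
def replsB : PySem.Dict String (PySem.Dict String String) :=
  PySem.Dict.ofList
    [ ("hanging", PySem.Dict.ofList
        [ ("<sup>", "<tspan dy=\"-7%\" font-size=\"70%\">"),
          ("</sup>", "</tspan>"),
          ("<sub>", "<tspan dy=\"7%\" font-size=\"70%\">"),
          ("</sub>", "</tspan>") ]),
      ("middle", PySem.Dict.ofList
        [ ("<sup>", "<tspan dy=\"-2%\" font-size=\"70%\">"),
          ("</sup>", "</tspan>"),
          ("<sub>", "<tspan dy=\"2%\" font-size=\"70%\">"),
          ("</sub>", "</tspan>") ]) ]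

-- the while-loop of Source B: at position i try the four tags in order; on a match append table[tag]
-- and skip the tag, otherwise copy one character (ported as structural recursion on the char list)
def scanB (r1 r2 r3 r4 : List Char) : List Char → List Char
  | [] => []
  | c :: t =>
    if "<sup>".toList.isPrefixOf (c :: t) then r1 ++ scanB r1 r2 r3 r4 (t.drop 4)
    else if "</sup>".toList.isPrefixOf (c :: t) then r2 ++ scanB r1 r2 r3 r4 (t.drop 5)
    else if "<sub>".toList.isPrefixOf (c :: t) then r3 ++ scanB r1 r2 r3 r4 (t.drop 4)
    else if "</sub>".toList.isPrefixOf (c :: t) then r4 ++ scanB r1 r2 r3 r4 (t.drop 5)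
    else c :: scanB r1 r2 r3 r4 t
  termination_by l => l.length
  decreasing_by all_goals simp

def html_to_svg_alt (text : String) (baseline : String) : String :=
  match replsB.get? baseline with
  | none => text  -- Source B raises KeyError here, like A; excluded by Pre_
  | some tbl =>
    String.ofList (scanB (tbl.getD "<sup>" "").toList (tbl.getD "</sup>" "").toList
                         (tbl.getD "<sub>" "").toList (tbl.getD "</sub>" "").toList text.toList)

-- ===== PRECONDITION & SPEC =====
-- Pre_ excludes exactly the baselines outside the dict, on which A (and B) raise KeyError.
def Pre_html_to_svg (text : String) (baseline : String) : Prop :=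
  baseline = "hanging" ∨ baseline = "middle"
instance (text : String) (baseline : String) : Decidable (Pre_html_to_svg text baseline) := by
  unfold Pre_html_to_svg; infer_instance

def pvWitness_html_to_svg : String × String := ("E = mc<sup>2</sup> and H<sub>2</sub>O", "hanging")

def Spec_html_to_svg (text : String) (baseline : String) (out : String) : Prop := out = html_to_svg_alt text baseline
instance (text : String) (baseline : String) (out : String) : Decidable (Spec_html_to_svg text baseline out) := by unfold Spec_html_to_svg; infer_instance

-- ===== CLAIM (what is proved, stated in full; the proofs are below) =====
def Claim_equal_html_to_svg : Prop := ∀ (text : String) (baseline : String), Dom_html_to_svg text baseline → Pre_html_to_svg text baseline → Spec_html_to_svg text baseline (html_to_svg text baseline)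

-- ===== LEMMAS AND PROOFS =====

-- recursive characterization of Python's str.replace (nonempty pattern)
def rep (old new : List Char) : List Char → List Char
  | [] => []
  | c :: t =>
    if old.isPrefixOf (c :: t) then new ++ rep old new (t.drop (old.length - 1))
    else c :: rep old new t
  termination_by l => l.length
  decreasing_by all_goals simp

theorem rep_cons (old new : List Char) (c : Char) (t : List Char) :
    rep old new (c :: t) =
      if old.isPrefixOf (c :: t) then new ++ rep old new (t.drop (old.length - 1))
      else c :: rep old new t := by
  rw [rep]

theorem go_eq_rep (old new : List Char) (hne : old ≠ []) :
    ∀ (fuel : Nat) (s acc : List Char), s.length ≤ fuel →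
      PySem.Chars.replace.go old new fuel s acc = acc.reverse ++ rep old new s := by
  intro fuel
  induction fuel with
  | zero =>
    intro s acc h
    have hs : s = [] := by cases s <;> simp_all
    subst hs
    rw [PySem.Chars.replace.go, rep]
  | succ n ih =>
    intro s acc h
    cases s with
    | nil => rw [PySem.Chars.replace.go] <;> simp [rep]
    | cons c t =>
      rw [PySem.Chars.replace.go, rep]
      by_cases hp : old.isPrefixOf (c :: t)
      · simp only [hp, if_true]
        obtain ⟨k, hk⟩ : ∃ k, old.length = k + 1 := by
          cases old with
          | nil => exact absurd rfl hne
          | cons a b => exact ⟨b.length, rfl⟩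
        have hdrop : List.drop old.length (c :: t) = t.drop (old.length - 1) := by
          rw [hk]; simp
        have hlen : (t.drop (old.length - 1)).length ≤ n := by
          simp at h ⊢; omega
        rw [hdrop, ih _ _ hlen]
        simp
      · simp only [hp]
        rw [ih t (c :: acc) (by simp at h; omega)]
        simp

theorem replace_eq_rep (old new s : List Char) (hne : old ≠ []) :
    PySem.Chars.replace s old new = rep old new s := by
  rw [PySem.Chars.replace]
  have : old.isEmpty = false := by cases old <;> simp_all
  rw [this]
  simp [go_eq_rep old new hne s.length s [] le_rfl]

-- 'misAll p r': no occurrence of p can start inside r (a mismatch happens before r runs out)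
def misAll (p r : List Char) : Bool :=
  (List.range r.length).all fun k =>
    (List.range p.length).any fun j => decide (k + j < r.length) && p[j]? != r[k + j]?

theorem misAll_iff (p r : List Char) : misAll p r = true ↔
    ∀ k < r.length, ∃ j < p.length, k + j < r.length ∧ p[j]? ≠ r[k + j]? := by
  simp [misAll, List.all_eq_true, List.any_eq_true, List.mem_range]

theorem misAll_shift (p : List Char) (c : Char) (r : List Char)
    (h : misAll p (c :: r) = true) : misAll p r = true := by
  rw [misAll_iff] at h ⊢
  intro k hk
  obtain ⟨j, hj, h1, h2⟩ := h (k + 1) (by simp; omega)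
  refine ⟨j, hj, by simp at h1 ⊢; omega, ?_⟩
  have : k + 1 + j = (k + j) + 1 := by omega
  rw [this] at h2
  simpa using h2

theorem not_prefix_of_misAll (p r : List Char) (hr : r ≠ []) (h : misAll p r = true)
    (X : List Char) : p.isPrefixOf (r ++ X) = false := by
  by_contra hx
  have hpre : p <+: (r ++ X) := by
    rw [← List.isPrefixOf_iff_prefix]
    simpa using hx
  rw [misAll_iff] at h
  obtain ⟨j, hj, h1, h2⟩ := h 0 (by cases r <;> simp_all)
  simp at h1 h2
  obtain ⟨s, hs⟩ := hpre
  apply h2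
  calc p[j]? = (p ++ s)[j]? := (List.getElem?_append_left hj).symm
    _ = (r ++ X)[j]? := by rw [hs]
    _ = r[j]? := List.getElem?_append_left h1

-- rep passes over a block r in which no occurrence of its pattern can start
theorem rep_append_of_misAll (p n : List Char) :
    ∀ (r : List Char), misAll p r = true → ∀ X, rep p n (r ++ X) = r ++ rep p n X := by
  intro r
  induction r with
  | nil => intro _ X; simp
  | cons c r' ihr =>
    intro hm X
    have hnp := not_prefix_of_misAll p (c :: r') (by simp) hm X
    simp only [List.cons_append] at hnp
    rw [List.cons_append, rep]
    simp only [hnp, Bool.false_eq_true, if_false]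
    rw [ihr (misAll_shift p c r' hm) X]
    simp

-- rep consumes its pattern at the head
theorem rep_head (p n : List Char) (hp : p ≠ []) (X : List Char) :
    rep p n (p ++ X) = n ++ rep p n X := by
  cases p with
  | nil => exact absurd rfl hp
  | cons a q =>
    rw [List.cons_append, rep_cons]
    have hpre : (a :: q).isPrefixOf (a :: (q ++ X)) = true := by
      rw [List.isPrefixOf_iff_prefix, ← List.cons_append]
      exact List.prefix_append _ _
    simp only [hpre, if_true]
    simp

-- a '<'-free prefix of a rep-image was already a prefix of the argument (replacements start with '<')
theorem prefix_of_rep (p R : List Char) (hR : R[0]? = some '<') :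
    ∀ (n : Nat) (t u : List Char), t.length ≤ n → u.all (· != '<') = true →
      u <+: rep p R t → u <+: t := by
  intro n
  induction n with
  | zero =>
    intro t u ht hu hpre
    have : t = [] := by cases t <;> simp_all
    subst this
    rw [rep] at hpre
    exact hpre
  | succ m ih =>
    intro t u ht hu hpre
    cases t with
    | nil => rw [rep] at hpre; exact hpre
    | cons c ts =>
      rw [rep_cons] at hpre
      by_cases hm : p.isPrefixOf (c :: ts)
      · simp only [hm, if_true] at hpre
        cases u with
        | nil => exact List.nil_prefix
        | cons d u' =>
          exfalso
          obtain ⟨R', hRR⟩ : ∃ R', R = '<' :: R' := by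
            cases R with
            | nil => simp at hR
            | cons x y => simp at hR; exact ⟨y, by rw [hR]⟩
          subst hRR
          obtain ⟨s, hs⟩ := hpre
          simp only [List.cons_append] at hs
          have hd : d = '<' := by
            have := congrArg (fun l => l[0]?) hs
            simpa using this
          simp [hd] at hu
      · simp only [hm, Bool.false_eq_true, if_false] at hpre
        cases u with
        | nil => exact List.nil_prefix
        | cons d u' =>
          rw [List.cons_prefix_cons] at hpre ⊢
          obtain ⟨hd, hpre'⟩ := hpre
          simp at hu
          exact ⟨hd, ih ts u' (by simp at ht; omega) (by simp; exact hu.2) hpre'⟩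

-- patterns are '<' followed by a '<'-free tail; rep with a '<'-headed replacement cannot create one
theorem not_prefix_rep_chain (p : List Char) (u : List Char)
    (hpu : p = '<' :: u) (hu : u.all (· != '<') = true)
    (c : Char) (Y t : List Char)
    (hY : ∀ v, v.all (· != '<') = true → v <+: Y → v <+: t)
    (hnp : p.isPrefixOf (c :: t) = false) :
    p.isPrefixOf (c :: Y) = false := by
  by_contra hx
  have hpre : p <+: (c :: Y) := by
    rw [← List.isPrefixOf_iff_prefix]; simpa using hx
  subst hpu
  rw [List.cons_prefix_cons] at hpre
  obtain ⟨hc, hpre'⟩ := hpre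
  have : ('<' :: u).isPrefixOf (c :: t) = true := by
    rw [List.isPrefixOf_iff_prefix, ← hc, List.cons_prefix_cons]
    exact ⟨rfl, hY u hu hpre'⟩
  rw [this] at hnp
  exact absurd hnp (by simp)

theorem main_chain (Rsup Rsub : List Char)
    (hs : Rsup[0]? = some '<') (hb : Rsub[0]? = some '<')
    (m2s : misAll "</sup>".toList Rsup = true) (m3s : misAll "<sub>".toList Rsup = true)
    (m4s : misAll "</sub>".toList Rsup = true) (m4b : misAll "</sub>".toList Rsub = true) :
    ∀ (n : Nat) (cs : List Char), cs.length ≤ n →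
      rep "</sub>".toList "</tspan>".toList
        (rep "<sub>".toList Rsub
          (rep "</sup>".toList "</tspan>".toList
            (rep "<sup>".toList Rsup cs)))
      = scanB Rsup "</tspan>".toList Rsub "</tspan>".toList cs := by
  intro n
  induction n with
  | zero =>
    intro cs h
    have : cs = [] := by cases cs <;> simp_all
    subst this
    simp [scanB, rep]
  | succ m ih =>
    intro cs h
    cases cs with
    | nil => simp [scanB, rep]
    | cons c t =>
      rw [scanB]
      by_cases h1 : "<sup>".toList.isPrefixOf (c :: t)
      · obtain ⟨s, hs'⟩ := List.isPrefixOf_iff_prefix.mp h1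
        have hct : c :: t = "<sup>".toList ++ s := hs'.symm
        have hts : t.drop 4 = s := by
          have := congrArg (List.drop 5) hct
          simpa using this
        simp only [h1, if_true]
        rw [hts, hct, rep_head _ _ (by decide),
            rep_append_of_misAll _ _ Rsup m2s, rep_append_of_misAll _ _ Rsup m3s,
            rep_append_of_misAll _ _ Rsup m4s]
        rw [ih s (by have := congrArg List.length hct; simp at this h; omega)]
      · simp only [h1, Bool.false_eq_true, if_false]
        by_cases h2 : "</sup>".toList.isPrefixOf (c :: t)
        · obtain ⟨s, hs'⟩ := List.isPrefixOf_iff_prefix.mp h2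
          have hct : c :: t = "</sup>".toList ++ s := hs'.symm
          have hts : t.drop 5 = s := by
            have := congrArg (List.drop 6) hct
            simpa using this
          simp only [h2, if_true]
          rw [hts, hct, rep_append_of_misAll _ _ _ (by decide : misAll "<sup>".toList "</sup>".toList = true),
              rep_head _ _ (by decide),
              rep_append_of_misAll _ _ _ (by decide : misAll "<sub>".toList "</tspan>".toList = true),
              rep_append_of_misAll _ _ _ (by decide : misAll "</sub>".toList "</tspan>".toList = true)]
          rw [ih s (by have := congrArg List.length hct; simp at this h; omega)]
        · simp only [h2, Bool.false_eq_true, if_false]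
          by_cases h3 : "<sub>".toList.isPrefixOf (c :: t)
          · obtain ⟨s, hs'⟩ := List.isPrefixOf_iff_prefix.mp h3
            have hct : c :: t = "<sub>".toList ++ s := hs'.symm
            have hts : t.drop 4 = s := by
              have := congrArg (List.drop 5) hct
              simpa using this
            simp only [h3, if_true]
            rw [hts, hct, rep_append_of_misAll _ _ _ (by decide : misAll "<sup>".toList "<sub>".toList = true),
                rep_append_of_misAll _ _ _ (by decide : misAll "</sup>".toList "<sub>".toList = true),
                rep_head _ _ (by decide),
                rep_append_of_misAll _ _ Rsub m4b]
            rw [ih s (by have := congrArg List.length hct; simp at this h; omega)]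
          · simp only [h3, Bool.false_eq_true, if_false]
            by_cases h4 : "</sub>".toList.isPrefixOf (c :: t)
            · obtain ⟨s, hs'⟩ := List.isPrefixOf_iff_prefix.mp h4
              have hct : c :: t = "</sub>".toList ++ s := hs'.symm
              have hts : t.drop 5 = s := by
                have := congrArg (List.drop 6) hct
                simpa using this
              simp only [h4, if_true]
              rw [hts, hct, rep_append_of_misAll _ _ _ (by decide : misAll "<sup>".toList "</sub>".toList = true),
                  rep_append_of_misAll _ _ _ (by decide : misAll "</sup>".toList "</sub>".toList = true),
                  rep_append_of_misAll _ _ _ (by decide : misAll "<sub>".toList "</sub>".toList = true),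
                  rep_head _ _ (by decide)]
              rw [ih s (by have := congrArg List.length hct; simp at this h; omega)]
            · simp only [h4, Bool.false_eq_true, if_false]
              have ht : t.length ≤ m := by simp at h; omega
              -- peel back through each rep layer
              have hpeel1 : ∀ v : List Char, v.all (· != '<') = true →
                  v <+: rep "<sup>".toList Rsup t → v <+: t :=
                fun v hv => prefix_of_rep _ _ hs t.length t v le_rfl hv
              have hpeel2 : ∀ v : List Char, v.all (· != '<') = true →
                  v <+: rep "</sup>".toList "</tspan>".toList (rep "<sup>".toList Rsup t) →
                  v <+: rep "<sup>".toList Rsup t :=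
                fun v hv => prefix_of_rep _ _ (by decide) _ _ v le_rfl hv
              have hpeel3 : ∀ v : List Char, v.all (· != '<') = true →
                  v <+: rep "<sub>".toList Rsub (rep "</sup>".toList "</tspan>".toList (rep "<sup>".toList Rsup t)) →
                  v <+: rep "</sup>".toList "</tspan>".toList (rep "<sup>".toList Rsup t) :=
                fun v hv => prefix_of_rep _ _ hb _ _ v le_rfl hv
              have hn1 : "<sup>".toList.isPrefixOf (c :: t) = false := by
                exact eq_false_of_ne_true h1
              rw [rep_cons, hn1]
              simp only [Bool.false_eq_true, if_false]
              have hn2 : "</sup>".toList.isPrefixOf (c :: rep "<sup>".toList Rsup t) = false := by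
                refine not_prefix_rep_chain _ "/sup>".toList rfl (by decide) c _ t hpeel1 ?_
                exact eq_false_of_ne_true h2
              rw [rep_cons, hn2]
              simp only [Bool.false_eq_true, if_false]
              have hn3 : "<sub>".toList.isPrefixOf
                  (c :: rep "</sup>".toList "</tspan>".toList (rep "<sup>".toList Rsup t)) = false := by
                refine not_prefix_rep_chain _ "sub>".toList rfl (by decide) c _ t
                  (fun v hv hp' => hpeel1 v hv (hpeel2 v hv hp')) ?_
                exact eq_false_of_ne_true h3
              rw [rep_cons, hn3]
              simp only [Bool.false_eq_true, if_false]
              have hn4 : "</sub>".toList.isPrefixOf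
                  (c :: rep "<sub>".toList Rsub (rep "</sup>".toList "</tspan>".toList (rep "<sup>".toList Rsup t))) = false := by
                refine not_prefix_rep_chain _ "/sub>".toList rfl (by decide) c _ t
                  (fun v hv hp' => hpeel1 v hv (hpeel2 v hv (hpeel3 v hv hp'))) ?_
                exact eq_false_of_ne_true h4
              rw [rep_cons, hn4]
              simp only [Bool.false_eq_true, if_false]
              rw [ih t ht]

theorem case_baseline (text : String) (Rsup Rsub : String)
    (hs : Rsup.toList[0]? = some '<') (hb : Rsub.toList[0]? = some '<')
    (m2s : misAll "</sup>".toList Rsup.toList = true) (m3s : misAll "<sub>".toList Rsup.toList = true)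
    (m4s : misAll "</sub>".toList Rsup.toList = true) (m4b : misAll "</sub>".toList Rsub.toList = true) :
    PySem.Str.replace (PySem.Str.replace (PySem.Str.replace (PySem.Str.replace text
      "<sup>" Rsup) "</sup>" "</tspan>") "<sub>" Rsub) "</sub>" "</tspan>"
    = String.ofList (scanB Rsup.toList "</tspan>".toList Rsub.toList "</tspan>".toList text.toList) := by
  simp only [PySem.Str.replace, String.toList_ofList]
  congr 1
  rw [replace_eq_rep _ _ _ (by decide), replace_eq_rep _ _ _ (by decide),
      replace_eq_rep _ _ _ (by decide), replace_eq_rep _ _ _ (by decide)]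
  exact main_chain Rsup.toList Rsub.toList hs hb m2s m3s m4s m4b text.toList.length text.toList le_rfl

theorem case_hanging (text : String) : html_to_svg text "hanging" = html_to_svg_alt text "hanging" := by
  have hA : html_to_svg text "hanging" =
      PySem.Str.replace (PySem.Str.replace (PySem.Str.replace (PySem.Str.replace text
        "<sup>" "<tspan dy=\"-7%\" font-size=\"70%\">") "</sup>" "</tspan>")
        "<sub>" "<tspan dy=\"7%\" font-size=\"70%\">") "</sub>" "</tspan>" := rfl
  have hB : html_to_svg_alt text "hanging" =
      String.ofList (scanB "<tspan dy=\"-7%\" font-size=\"70%\">".toList "</tspan>".toList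
        "<tspan dy=\"7%\" font-size=\"70%\">".toList "</tspan>".toList text.toList) := rfl
  rw [hA, hB]
  exact case_baseline text _ _ (by decide) (by decide) (by decide) (by decide) (by decide) (by decide)

theorem case_middle (text : String) : html_to_svg text "middle" = html_to_svg_alt text "middle" := by
  have hA : html_to_svg text "middle" =
      PySem.Str.replace (PySem.Str.replace (PySem.Str.replace (PySem.Str.replace text
        "<sup>" "<tspan dy=\"-2%\" font-size=\"70%\">") "</sup>" "</tspan>")
        "<sub>" "<tspan dy=\"2%\" font-size=\"70%\">") "</sub>" "</tspan>" := rfl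
  have hB : html_to_svg_alt text "middle" =
      String.ofList (scanB "<tspan dy=\"-2%\" font-size=\"70%\">".toList "</tspan>".toList
        "<tspan dy=\"2%\" font-size=\"70%\">".toList "</tspan>".toList text.toList) := rfl
  rw [hA, hB]
  exact case_baseline text _ _ (by decide) (by decide) (by decide) (by decide) (by decide) (by decide)

-- ===== VERDICT (by name: the statement is the Claim_ definition above) =====
theorem html_to_svg_spec : Claim_equal_html_to_svg := by
  intro text baseline _ hpre
  unfold Spec_html_to_svg
  rcases hpre with h | h <;> subst h
  · exact case_hanging text
  · exact case_middle text
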